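-- pv_equiv track=rewrite | github.com/subslog/Baekjoon | 백준/Gold/1891. 사분면/사분면.py | num_find
-- ===== SOURCE A (Python) =====
-- def num_find(r: int, c: int, lenth: int, dx: int, dy: int):
--     """dx, dy 좌표의 사분면 번호를 반환하는 함수"""
--     # dx, dy 좌표의 번호를 찾으면 종료
--     if lenth == 1:
--         return ''
--     # 목적지의 분면에 따라 다르게 이동한다.
--     next_lenth = lenth // 2
--     # 제1사분면이면 c 증가
--     if dx < r + next_lenth and dy >= c + next_lenth:
--         return '1' + num_find(r, c + next_lenth, next_lenth, dx, dy)
--     # 제2사분면이면 유지한다.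
--     elif dx < r + next_lenth and dy < c + next_lenth:
--         return '2' + num_find(r, c, next_lenth, dx, dy)
--     # 제3사분면이면 r 증가
--     elif dx >= r + next_lenth and dy < c + next_lenth:
--         return '3' + num_find(r + next_lenth, c, next_lenth, dx, dy)
--     # 제4사분면이면 r, c 증가
--     elif dx >= r + next_lenth and dy >= c + next_lenth:
--         return '4' + num_find(r + next_lenth, c + next_lenth, next_lenth, dx, dy)
-- ===== SOURCE B (Python) =====
-- def num_find(r: int, c: int, lenth: int, dx: int, dy: int):
--     """Offset-based version: precompute the halving sizes, then decode the two
--     offset coordinates against each size with a digit table lookup."""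
--     sizes = []
--     n = lenth
--     while n != 1:
--         n //= 2
--         sizes.append(n)
--     x, y = dx - r, dy - c
--     out = []
--     for n in sizes:
--         bx, by = x >= n, y >= n
--         out.append("2134"[2 * bx + by])
--         if bx:
--             x -= n
--         if by:
--             y -= n
--     return ''.join(out)
-- ===== Notes on version B (the rewrite author's own statement) =====
-- stated objective: alternative
-- what changed: Replaces A's recursion that threads the cell origin (r, c) and builds the string front-to-back with two staged passes: first compute the list of halved sizes from lenth alone, then decode the fixed offsets dx-r, dy-c against each size by subtraction and a '2134' digit-table lookup, joining the collected digits.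
import Mathlib
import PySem

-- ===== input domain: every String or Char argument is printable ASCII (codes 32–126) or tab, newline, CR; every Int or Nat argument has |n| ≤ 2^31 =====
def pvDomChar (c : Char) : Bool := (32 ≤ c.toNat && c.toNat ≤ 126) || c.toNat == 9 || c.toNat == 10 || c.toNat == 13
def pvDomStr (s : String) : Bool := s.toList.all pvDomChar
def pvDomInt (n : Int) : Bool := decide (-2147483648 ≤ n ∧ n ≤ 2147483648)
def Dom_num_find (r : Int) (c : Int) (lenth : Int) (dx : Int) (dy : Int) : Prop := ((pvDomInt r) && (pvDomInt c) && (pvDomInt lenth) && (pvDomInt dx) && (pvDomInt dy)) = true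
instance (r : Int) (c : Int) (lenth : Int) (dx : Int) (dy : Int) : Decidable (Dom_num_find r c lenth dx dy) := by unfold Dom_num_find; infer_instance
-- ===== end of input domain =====

-- B replaces A's coordinate-carrying recursion by two staged passes: precompute the halving sizes, then decode the offset coordinates against each size with a digit-table lookup; alternative decomposition, same cost.


-- ===== PORT A =====
-- fuel = lenth.toNat + 1 makes the recursion total; on Pre_ (lenth ≥ 1) the fuel
-- is never exhausted since lenth strictly halves each step, so this is A exactly.
def numFindGoA : Nat → Int → Int → Int → Int → Int → String
  | 0, _, _, _, _, _ => ""
  | Nat.succ f, r, c, lenth, dx, dy =>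
    if lenth = 1 then ""
    else
      let n := PySem.Int.floordiv lenth 2
      if dx < r + n ∧ dy ≥ c + n then "1" ++ numFindGoA f r (c + n) n dx dy
      else if dx < r + n ∧ dy < c + n then "2" ++ numFindGoA f r c n dx dy
      else if dx ≥ r + n ∧ dy < c + n then "3" ++ numFindGoA f (r + n) c n dx dy
      else "4" ++ numFindGoA f (r + n) (c + n) n dx dy

def num_find (r : Int) (c : Int) (lenth : Int) (dx : Int) (dy : Int) : String :=
  numFindGoA (lenth.toNat + 1) r c lenth dx dy

-- ===== PORT B =====
-- first pass of Source B: the list of successive halved sizes (same fuel bound; never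
-- exhausted when lenth ≥ 1 since n strictly halves each step)
def numFindSizes : Nat → Int → List Int
  | 0, _ => []
  | Nat.succ f, n =>
    if n = 1 then []
    else
      let m := PySem.Int.floordiv n 2
      m :: numFindSizes f m

-- second pass of Source B: decode offsets x, y against each size; "2134"[2*bx+by] is
-- ported as pyGet? on the table's characters with getD (the index is always 0..3,
-- so the default never fires and the port is exact).
def numFindDecode : List Int → Int → Int → List Char → List Char
  | [], _, _, out => out
  | n :: ns, x, y, out =>
    let bx : Int := if x ≥ n then 1 else 0
    let by' : Int := if y ≥ n then 1 else 0
    let d : Char := (PySem.List.pyGet? ['2', '1', '3', '4'] (2 * bx + by')).getD ' '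
    numFindDecode ns (if x ≥ n then x - n else x) (if y ≥ n then y - n else y) (out ++ [d])

def num_find_alt (r : Int) (c : Int) (lenth : Int) (dx : Int) (dy : Int) : String :=
  String.ofList (numFindDecode (numFindSizes (lenth.toNat + 1) lenth) (dx - r) (dy - c) [])

-- ===== PRECONDITION & SPEC =====
-- Pre_ excludes lenth ≤ 0, where the Python A recurses forever (RecursionError) and B's first loop never terminates.
def Pre_num_find (r : Int) (c : Int) (lenth : Int) (dx : Int) (dy : Int) : Prop := 1 ≤ lenth
instance (r : Int) (c : Int) (lenth : Int) (dx : Int) (dy : Int) : Decidable (Pre_num_find r c lenth dx dy) := by unfold Pre_num_find; infer_instance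
def pvWitness_num_find : Int × Int × Int × Int × Int := (0, 0, 8, 3, 5)

def Spec_num_find (r : Int) (c : Int) (lenth : Int) (dx : Int) (dy : Int) (out : String) : Prop := out = num_find_alt r c lenth dx dy
instance (r : Int) (c : Int) (lenth : Int) (dx : Int) (dy : Int) (out : String) : Decidable (Spec_num_find r c lenth dx dy out) := by unfold Spec_num_find; infer_instance

-- ===== CLAIM =====
def Claim_equal_num_find : Prop := ∀ (r : Int) (c : Int) (lenth : Int) (dx : Int) (dy : Int), Dom_num_find r c lenth dx dy → Pre_num_find r c lenth dx dy → Spec_num_find r c lenth dx dy (num_find r c lenth dx dy)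

-- ===== LEMMAS AND PROOFS =====
theorem decode_eq_goA (f : Nat) : ∀ (r c n dx dy : Int) (out : List Char),
    numFindDecode (numFindSizes f n) (dx - r) (dy - c) out
      = out ++ (numFindGoA f r c n dx dy).toList := by
  induction f with
  | zero => intro r c n dx dy out; simp [numFindSizes, numFindDecode, numFindGoA]
  | succ f ih =>
    intro r c n dx dy out
    by_cases h1 : n = 1
    · simp [numFindSizes, numFindDecode, numFindGoA, h1]
    · simp only [numFindSizes, numFindGoA, if_neg h1]
      set m := PySem.Int.floordiv n 2 with hm
      by_cases hx : dx - r ≥ m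
      · by_cases hy : dy - c ≥ m
        · have hx' : ¬ dx < r + m := by omega
          have hy' : ¬ dy < c + m := by omega
          have hx2 : r + m ≤ dx := by omega
          have hy2 : c + m ≤ dy := by omega
          have e1 : dx - r - m = dx - (r + m) := by ring
          have e2 : dy - c - m = dy - (c + m) := by ring
          simp [numFindDecode, hx, hy, hx', hy', hx2, hy2, PySem.List.pyGet?, PySem.List.pyIdx?,
                e1, e2, ih]
        · have hx' : ¬ dx < r + m := by omega
          have hy' : dy < c + m := by omega
          have hx2 : r + m ≤ dx := by omega
          have hy2 : ¬ c + m ≤ dy := by omega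
          have e1 : dx - r - m = dx - (r + m) := by ring
          simp [numFindDecode, hx, hy, hx', hy', hx2, hy2, PySem.List.pyGet?, PySem.List.pyIdx?,
                e1, ih]
      · by_cases hy : dy - c ≥ m
        · have hx' : dx < r + m := by omega
          have hy' : ¬ dy < c + m := by omega
          have hx2 : ¬ r + m ≤ dx := by omega
          have hy2 : c + m ≤ dy := by omega
          have e2 : dy - c - m = dy - (c + m) := by ring
          simp [numFindDecode, hx, hy, hx', hy', hx2, hy2, PySem.List.pyGet?, PySem.List.pyIdx?,
                e2, ih]
        · have hx' : dx < r + m := by omega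
          have hy' : dy < c + m := by omega
          have hx2 : ¬ r + m ≤ dx := by omega
          have hy2 : ¬ c + m ≤ dy := by omega
          simp [numFindDecode, hx, hy, hx', hy', hx2, hy2, PySem.List.pyGet?, PySem.List.pyIdx?, ih]

-- ===== VERDICT =====
theorem num_find_spec : Claim_equal_num_find := by
  intro r c lenth dx dy _ _
  unfold Spec_num_find num_find num_find_alt
  rw [decode_eq_goA]
  simp [String.ofList_toList]
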